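-- pv_equiv track=rewrite | github.com/eren23/crucible-community-tap | launchers/diff_xyz/sft_smoke.py | _build_search_replace
-- ===== SOURCE A (Python) =====
-- import difflib
--
-- def _build_search_replace(old: str, new: str) -> str:
--     """Render a search-replace diff from two snippets (line-level matcher)."""
--     old_lines = old.splitlines(keepends=False)
--     new_lines = new.splitlines(keepends=False)
--     matcher = difflib.SequenceMatcher(a=old_lines, b=new_lines, autojunk=False)
--     blocks: list[str] = []
--     for tag, i1, i2, j1, j2 in matcher.get_opcodes():
--         if tag == "equal":
--             continue
--         search = "\n".join(old_lines[i1:i2])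
--         replace = "\n".join(new_lines[j1:j2])
--         blocks.append(
--             f"<<<<<<< SEARCH\n{search}\n=======\n{replace}\n>>>>>>> REPLACE"
--         )
--     return "\n".join(blocks)
-- ===== SOURCE B (Python) =====
-- def _longest_block(a, b, alo, ahi, blo, bhi):
--     """Longest common run of lines inside the window; ties go to the
--     smallest (start_a, start_b).  Classic rolling-row dynamic programme."""
--     best_i, best_j, best_k = alo, blo, 0
--     row = [0] * (bhi - blo)
--     for i in range(alo, ahi):
--         new = [0] * (bhi - blo)
--         for idx in range(bhi - blo):
--             if a[i] == b[blo + idx]: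
--                 k = (row[idx - 1] if idx else 0) + 1
--                 new[idx] = k
--                 if k > best_k:
--                     best_i, best_j, best_k = i + 1 - k, blo + idx + 1 - k, k
--         row = new
--     return best_i, best_j, best_k
--
--
-- def _blocks(a, b, alo, ahi, blo, bhi, out):
--     """In-order divide and conquer around the longest common run."""
--     i, j, k = _longest_block(a, b, alo, ahi, blo, bhi)
--     if k:
--         _blocks(a, b, alo, i, blo, j, out)
--         out.append((i, j, k))
--         _blocks(a, b, i + k, ahi, j + k, bhi, out)
--
--
-- def _build_search_replace(old: str, new: str) -> str:
--     """Render a search-replace diff from two snippets (line-level matcher)."""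
--     a = old.splitlines()
--     b = new.splitlines()
--     blocks = []
--     _blocks(a, b, 0, len(a), 0, len(b), blocks)
--     parts = []
--     i = j = 0
--     for ai, bj, k in blocks + [(len(a), len(b), 0)]:
--         if i < ai or j < bj:
--             parts.append("<<<<<<< SEARCH\n%s\n=======\n%s\n>>>>>>> REPLACE"
--                          % ("\n".join(a[i:ai]), "\n".join(b[j:bj])))
--         i, j = ai + k, bj + k
--     return "\n".join(parts)
-- ===== Notes on version B (the rewrite author's own statement) =====
-- stated objective: alternative
-- what changed: B replaces the difflib pipeline entirely: a rolling-row dynamic programme over the whole window computes the longest common run (instead of difflib's per-line occurrence index b2j with a j2len hash and junk-extension loops), an in-order divide-and-conquer recursion collects the blocks already sorted (instead of an explicit LIFO queue followed by sort and adjacent-block merge), and a single gap-cursor walk renders one SEARCH/REPLACE chunk per gap (instead of building get_opcodes' tagged opcode list and filtering out 'equal' entries).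
import Mathlib
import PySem

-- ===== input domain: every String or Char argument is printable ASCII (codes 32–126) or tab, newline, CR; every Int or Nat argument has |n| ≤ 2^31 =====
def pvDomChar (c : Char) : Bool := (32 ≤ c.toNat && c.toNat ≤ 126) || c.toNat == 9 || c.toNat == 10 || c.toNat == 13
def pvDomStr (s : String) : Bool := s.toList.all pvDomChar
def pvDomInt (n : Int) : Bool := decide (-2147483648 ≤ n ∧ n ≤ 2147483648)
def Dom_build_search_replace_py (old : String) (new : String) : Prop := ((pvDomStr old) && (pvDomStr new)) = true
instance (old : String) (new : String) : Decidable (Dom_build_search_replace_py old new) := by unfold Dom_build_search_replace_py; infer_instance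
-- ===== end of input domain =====

-- B replaces A's difflib pipeline by its own matcher: a rolling-row dynamic programme for the
-- longest common run, an in-order divide-and-conquer recursion, and direct gap-cursor rendering
-- (objective: alternative — no occurrence index, no opcode list, no sort/merge pass).

-- the SEARCH/REPLACE template (A's f-string; B's %-format with the same two fields)
def srBlock (search replace : String) : String :=
  "<<<<<<< SEARCH\n" ++ search ++ "\n=======\n" ++ replace ++ "\n>>>>>>> REPLACE"

-- ===== PORT A =====
-- A calls difflib.SequenceMatcher; ported step for step from CPython's difflib with
-- isjunk=None, autojunk=False, so the junk sets are empty.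

-- b2j: for i, elt in enumerate(b): b2j.setdefault(elt, []).append(i)   (indices are ≥ 0: Nat)
def dl_b2j (b : List String) : PySem.Dict String (List Nat) :=
  b.zipIdx.foldl (fun d p => d.modify p.1 [] (fun l => l ++ [p.2])) PySem.Dict.empty

-- inner loop of find_longest_match over b2j.get(a[i], []); second component of the result is
-- (besti, bestj, bestsize); `break` on j >= bhi returns early (the indices list is ascending)
def dl_inner (j2len : PySem.Dict Int Nat) (blo bhi i : Nat) :
    List Nat → PySem.Dict Int Nat → Nat × Nat × Nat → PySem.Dict Int Nat × (Nat × Nat × Nat)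
  | [], newj2len, best => (newj2len, best)
  | j :: js, newj2len, best =>
    if j < blo then dl_inner j2len blo bhi i js newj2len best
    else if bhi ≤ j then (newj2len, best)
    else
      let k := j2len.getD ((j : Int) - 1) 0 + 1
      let newj2len := newj2len.insert (j : Int) k
      let best := if best.2.2 < k then (i + 1 - k, j + 1 - k, k) else best
      dl_inner j2len blo bhi i js newj2len best

-- for i in range(alo, ahi): … j2len = newj2len   (j2len keyed by Int: Python reads j2len.get(j-1, 0))
def dl_flm_core (a : List String) (b2j : PySem.Dict String (List Nat))
    (alo ahi blo bhi : Nat) : Nat × Nat × Nat :=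
  ((List.range' alo (ahi - alo)).foldl
    (fun st i => dl_inner st.1 blo bhi i (b2j.getD (a.getD i "") []) PySem.Dict.empty st.2)
    (PySem.Dict.empty, (alo, blo, 0))).2

-- while besti > alo and bestj > blo and a[besti-1] == b[bestj-1]: … (fuel: besti decreases)
def dl_ext1 (a b : List String) (alo blo : Nat) : Nat → Nat × Nat × Nat → Nat × Nat × Nat
  | 0, best => best
  | fuel + 1, (besti, bestj, bestsize) =>
    if alo < besti ∧ blo < bestj ∧ a.getD (besti - 1) "" = b.getD (bestj - 1) "" then
      dl_ext1 a b alo blo fuel (besti - 1, bestj - 1, bestsize + 1)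
    else (besti, bestj, bestsize)

-- while besti+bestsize < ahi and bestj+bestsize < bhi and a[besti+bestsize] == b[bestj+bestsize]: …
def dl_ext2 (a b : List String) (ahi bhi : Nat) : Nat → Nat × Nat × Nat → Nat × Nat × Nat
  | 0, best => best
  | fuel + 1, (besti, bestj, bestsize) =>
    if besti + bestsize < ahi ∧ bestj + bestsize < bhi ∧
        a.getD (besti + bestsize) "" = b.getD (bestj + bestsize) "" then
      dl_ext2 a b ahi bhi fuel (besti, bestj, bestsize + 1)
    else (besti, bestj, bestsize)

-- find_longest_match; the two junk-extension while-loops of difflib never fire (bjunk is empty)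
def dl_flm (a b : List String) (b2j : PySem.Dict String (List Nat))
    (alo ahi blo bhi : Nat) : Nat × Nat × Nat :=
  let best := dl_flm_core a b2j alo ahi blo bhi
  let best := dl_ext1 a b alo blo best.1 best
  dl_ext2 a b ahi bhi ahi best

-- get_matching_blocks queue loop; the queue is a LIFO stack (list.pop() pops the last append),
-- represented head-first; fuel len(a)+len(b)+1 bounds the number of pops (each push of two
-- sub-intervals shrinks the total interval size by at least 2)
def dl_mb_loop (a b : List String) (b2j : PySem.Dict String (List Nat)) :
    Nat → List (Nat × Nat × Nat × Nat) → List (Nat × Nat × Nat) → List (Nat × Nat × Nat)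
  | 0, _, acc => acc
  | _ + 1, [], acc => acc
  | fuel + 1, (alo, ahi, blo, bhi) :: rest, acc =>
    match dl_flm a b b2j alo ahi blo bhi with
    | (i, j, k) =>
      if k ≠ 0 then
        let q := if alo < i ∧ blo < j then (alo, i, blo, j) :: rest else rest
        let q := if i + k < ahi ∧ j + k < bhi then (i + k, ahi, j + k, bhi) :: q else q
        dl_mb_loop a b b2j fuel q (acc ++ [(i, j, k)])
      else
        dl_mb_loop a b b2j fuel rest acc

-- merge of adjacent blocks (the i1 = j1 = k1 = 0 / non_adjacent loop of get_matching_blocks)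
def dl_merge : List (Nat × Nat × Nat) → Nat × Nat × Nat → List (Nat × Nat × Nat) → List (Nat × Nat × Nat)
  | [], (i1, j1, k1), acc => if k1 ≠ 0 then acc ++ [(i1, j1, k1)] else acc
  | (i2, j2, k2) :: t, (i1, j1, k1), acc =>
    if i1 + k1 = i2 ∧ j1 + k1 = j2 then dl_merge t (i1, j1, k1 + k2) acc
    else if k1 ≠ 0 then dl_merge t (i2, j2, k2) (acc ++ [(i1, j1, k1)])
    else dl_merge t (i2, j2, k2) acc

def dl_matching_blocks (a b : List String) : List (Nat × Nat × Nat) :=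
  let b2j := dl_b2j b
  let mbs := dl_mb_loop a b b2j (a.length + b.length + 1) [(0, a.length, 0, b.length)] []
  -- matching_blocks.sort(): the collected blocks have pairwise disjoint a-intervals with k ≥ 1,
  -- so their first components are pairwise distinct and Python's full-tuple lexicographic sort
  -- is exactly the (stable) sort on the first component
  let mbs := PySem.List.sorted mbs (fun t => t.1) false
  dl_merge mbs (0, 0, 0) [] ++ [(a.length, b.length, 0)]

-- get_opcodes: cursor walk over the matching blocks collecting tagged opcode tuples
def a_opcodes : List (Nat × Nat × Nat) → Nat → Nat →
    List (String × Nat × Nat × Nat × Nat) → List (String × Nat × Nat × Nat × Nat)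
  | [], _, _, ans => ans
  | (ai, bj, size) :: t, i, j, ans =>
    let tag := if i < ai ∧ j < bj then "replace"
      else if i < ai then "delete" else if j < bj then "insert" else ""
    let ans := if tag ≠ "" then ans ++ [(tag, i, ai, j, bj)] else ans
    let ans := if size ≠ 0 then ans ++ [("equal", ai, ai + size, bj, bj + size)] else ans
    a_opcodes t (ai + size) (bj + size) ans

-- body of A's `for tag, i1, i2, j1, j2 in matcher.get_opcodes(): …`
def a_blocks_step (ol nl : List String) (blocks : List String)
    (op : String × Nat × Nat × Nat × Nat) : List String :=
  match op with
  | (tag, i1, i2, j1, j2) =>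
    if tag = "equal" then blocks
    else
      let search := PySem.Str.join "\n" (PySem.List.slice ol (some (i1 : Int)) (some (i2 : Int)))
      let replace := PySem.Str.join "\n" (PySem.List.slice nl (some (j1 : Int)) (some (j2 : Int)))
      blocks ++ [srBlock search replace]

def build_search_replace_py (old : String) (new : String) : String :=
  let old_lines := PySem.Str.splitlines old
  let new_lines := PySem.Str.splitlines new
  let ops := a_opcodes (dl_matching_blocks old_lines new_lines) 0 0 []
  let blocks := ops.foldl (a_blocks_step old_lines new_lines) []
  PySem.Str.join "\n" blocks

-- ===== PORT B =====
-- _longest_block: rolling-row dynamic programme; outer loop over i, inner over idx,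
-- state = (row, (best_i, best_j, best_k)); `row[idx-1] if idx else 0` and `new[idx] = k`
-- are total list reads/writes (idx ranges over the row)
def bp_longest (a b : List String) (alo ahi blo bhi : Nat) : Nat × Nat × Nat :=
  ((List.range' alo (ahi - alo)).foldl
    (fun st i =>
      let row := st.1
      (List.range (bhi - blo)).foldl
        (fun st2 idx =>
          if a.getD i "" = b.getD (blo + idx) "" then
            let k := (if idx = 0 then 0 else row.getD (idx - 1) 0) + 1
            let new := st2.1.set idx k
            let best := if st2.2.2.2 < k then (i + 1 - k, blo + idx + 1 - k, k) else st2.2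
            (new, best)
          else st2)
        (List.replicate (bhi - blo) 0, st.2))
    (List.replicate (bhi - blo) 0, (alo, blo, 0))).2

-- _blocks: in-order recursion around the longest block; Python's recursion terminates because
-- the windows shrink — here made structural with a fuel that the proofs show is sufficient
def bp_blocks (a b : List String) : Nat → Nat → Nat → Nat → Nat → List (Nat × Nat × Nat)
  | 0, _, _, _, _ => []
  | fuel + 1, alo, ahi, blo, bhi =>
    match bp_longest a b alo ahi blo bhi with
    | (i, j, k) =>
      if k ≠ 0 then
        bp_blocks a b fuel alo i blo j ++ (i, j, k) :: bp_blocks a b fuel (i + k) ahi (j + k) bhi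
      else []

-- the rendering loop `for ai, bj, k in blocks + [(len(a), len(b), 0)]: …` with gap cursors i, j
def b_gaps (ol nl : List String) : List (Nat × Nat × Nat) → Nat → Nat → List String → List String
  | [], _, _, parts => parts
  | (ai, bj, size) :: t, i, j, parts =>
    let parts := if i < ai ∨ j < bj then
        parts ++ [srBlock
          (PySem.Str.join "\n" (PySem.List.slice ol (some (i : Int)) (some (ai : Int))))
          (PySem.Str.join "\n" (PySem.List.slice nl (some (j : Int)) (some (bj : Int))))]
      else parts
    b_gaps ol nl t (ai + size) (bj + size) parts

def build_search_replace_py_alt (old : String) (new : String) : String :=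
  let a := PySem.Str.splitlines old
  let b := PySem.Str.splitlines new
  let blocks := bp_blocks a b (a.length + b.length + 1) 0 a.length 0 b.length
  PySem.Str.join "\n" (b_gaps a b (blocks ++ [(a.length, b.length, 0)]) 0 0 [])

-- ===== PRECONDITION & SPEC =====
def Spec_build_search_replace_py (old : String) (new : String) (out : String) : Prop := out = build_search_replace_py_alt old new
instance (old : String) (new : String) (out : String) : Decidable (Spec_build_search_replace_py old new out) := by unfold Spec_build_search_replace_py; infer_instance

-- ===== CLAIM (what is proved, stated in full; the proofs are below) =====
def Claim_equal_build_search_replace_py : Prop := ∀ (old : String) (new : String), Dom_build_search_replace_py old new → Spec_build_search_replace_py old new (build_search_replace_py old new)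


-- ===== LEMMAS AND PROOFS =====

-- The DP table behind B's rolling row: dpR t j = length of the common run ending at
-- a-index alo+t-1 and b-index j, truncated at the window edges alo/blo.
def dpR (a b : List String) (alo blo : Nat) : Nat → Nat → Nat
  | 0, _ => 0
  | t+1, j =>
    if a.getD (alo + t) "" = b.getD j "" then
      (if blo < j then dpR a b alo blo t (j - 1) else 0) + 1
    else 0

lemma dpR_le_left (a b : List String) (alo blo : Nat) :
    ∀ t j, dpR a b alo blo t j ≤ t := by
  intro t
  induction t with
  | zero => intro j; simp [dpR]
  | succ t ih =>
    intro j
    simp only [dpR]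
    split
    · split
      · exact Nat.succ_le_succ (ih (j - 1))
      · omega
    · omega

lemma dpR_le_right (a b : List String) (alo blo : Nat) :
    ∀ t j, dpR a b alo blo t j ≤ j - blo + 1 := by
  intro t
  induction t with
  | zero => intro j; simp [dpR]
  | succ t ih =>
    intro j
    simp only [dpR]
    split
    · split
      · have := ih (j - 1); omega
      · omega
    · omega

-- a positive dpR value exhibits its run: every step matches, and all but the last keep j above blo
lemma dpR_run (a b : List String) (alo blo : Nat) :
    ∀ t j s, s < dpR a b alo blo t j →
      a.getD (alo + t - 1 - s) "" = b.getD (j - s) "" ∧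
      (s + 1 < dpR a b alo blo t j → blo < j - s) := by
  intro t
  induction t with
  | zero => intro j s h; simp [dpR] at h
  | succ t ih =>
    intro j s h
    simp only [dpR] at h ⊢
    by_cases hm : a.getD (alo + t) "" = b.getD j ""
    · simp only [hm, if_true] at h ⊢
      by_cases hb : blo < j
      · simp only [hb, if_true] at h ⊢
        match s with
        | 0 =>
          refine ⟨by simpa using hm, ?_⟩
          intro hlt
          simpa using hb
        | s + 1 =>
          have hs : s < dpR a b alo blo t (j - 1) := by omega
          have := ih (j - 1) s hs
          constructor
          · have h1 : alo + (t + 1) - 1 - (s + 1) = alo + t - 1 - s := by omega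
            have h2 : j - (s + 1) = j - 1 - s := by omega
            rw [h1, h2]; exact this.1
          · intro hlt
            have h2 : j - (s + 1) = j - 1 - s := by omega
            rw [h2]; exact this.2 (by omega)
      · simp only [hb, if_false] at h ⊢
        match s with
        | 0 => exact ⟨by simpa using hm, by omega⟩
        | s + 1 => omega
    · rw [if_neg hm] at h; exact absurd h (by omega)

-- a concrete run gives a lower bound on dpR
lemma dpR_ge (a b : List String) (alo blo : Nat) :
    ∀ len t j, len ≤ t →
      (∀ s, s < len → a.getD (alo + t - 1 - s) "" = b.getD (j - s) "") →
      (∀ s, s + 1 < len → blo < j - s) →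
      len ≤ dpR a b alo blo t j := by
  intro len
  induction len with
  | zero => intro t j _ _ _; omega
  | succ len ih =>
    intro t j hlen hmatch hblo
    obtain ⟨t, rfl⟩ : ∃ u, t = u + 1 := ⟨t - 1, by omega⟩
    simp only [dpR]
    have hm0 : a.getD (alo + t) "" = b.getD j "" := by
      have := hmatch 0 (by omega); simpa using this
    rw [if_pos hm0]
    match len, ih with
    | 0, _ => omega
    | len + 1, ih =>
      have hb : blo < j := by have := hblo 0 (by omega); simpa using this
      rw [if_pos hb]
      have : len + 1 ≤ dpR a b alo blo t (j - 1) := by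
        refine ih t (j - 1) (by omega) ?_ ?_
        · intro s hs
          have h1 : alo + t - 1 - s = alo + (t + 1) - 1 - (s + 1) := by omega
          have h2 : j - 1 - s = j - (s + 1) := by omega
          rw [h1, h2]; exact hmatch (s + 1) (by omega)
        · intro s hs
          have h2 : j - 1 - s = j - (s + 1) := by omega
          rw [h2]; exact hblo (s + 1) (by omega)
      omega

-- the set of DP cells processed after tmax full rows plus c cells of row tmax+1
def cellIn (tmax n c t idx : Nat) : Prop :=
  (1 ≤ t ∧ t ≤ tmax ∧ idx < n) ∨ (t = tmax + 1 ∧ idx < c)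

-- what bp_longest's best-so-far is after those cells: initial, or a first maximal cell
def BestP (a b : List String) (alo blo n tmax c : Nat) (best : Nat × Nat × Nat) : Prop :=
  (best = (alo, blo, 0) ∧ ∀ t idx, cellIn tmax n c t idx → dpR a b alo blo t (blo + idx) = 0) ∨
  (1 ≤ best.2.2 ∧
    (∃ t idx, cellIn tmax n c t idx ∧ dpR a b alo blo t (blo + idx) = best.2.2 ∧
      best.1 = alo + t - best.2.2 ∧ best.2.1 = blo + idx + 1 - best.2.2) ∧
    ∀ t idx, cellIn tmax n c t idx → dpR a b alo blo t (blo + idx) ≤ best.2.2)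

lemma cellIn_shift (tmax n t idx : Nat) : cellIn tmax n n t idx ↔ cellIn (tmax + 1) n 0 t idx := by
  unfold cellIn; omega

lemma BestP_shift (a b : List String) (alo blo n tmax : Nat) (best : Nat × Nat × Nat) :
    BestP a b alo blo n tmax n best → BestP a b alo blo n (tmax + 1) 0 best := by
  unfold BestP
  rintro (⟨h1, h2⟩ | ⟨h1, ⟨t, idx, hc, h⟩, h3⟩)
  · exact Or.inl ⟨h1, fun t idx hc => h2 t idx ((cellIn_shift tmax n t idx).2 hc)⟩
  · exact Or.inr ⟨h1, ⟨t, idx, (cellIn_shift tmax n t idx).1 hc, h⟩,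
      fun t idx hc => h3 t idx ((cellIn_shift tmax n t idx).2 hc)⟩

-- row contents after tmax full rows / after c cells of the next row
def RowP (a b : List String) (alo blo n tmax : Nat) (row : List Nat) : Prop :=
  row.length = n ∧ ∀ idx, idx < n → row.getD idx 0 = dpR a b alo blo tmax (blo + idx)

def NewP (a b : List String) (alo blo n tmax c : Nat) (new : List Nat) : Prop :=
  new.length = n ∧ ∀ idx, idx < n →
    new.getD idx 0 = if idx < c then dpR a b alo blo (tmax + 1) (blo + idx) else 0

-- proof-side name for bp_longest's inner-loop body
def istep (a b : List String) (blo i : Nat) (row : List Nat)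
    (st2 : List Nat × Nat × Nat × Nat) (idx : Nat) : List Nat × Nat × Nat × Nat :=
  if a.getD i "" = b.getD (blo + idx) "" then
    let k := (if idx = 0 then 0 else row.getD (idx - 1) 0) + 1
    let new := st2.1.set idx k
    let best := if st2.2.2.2 < k then (i + 1 - k, blo + idx + 1 - k, k) else st2.2
    (new, best)
  else st2

lemma bp_longest_eq_istep (a b : List String) (alo ahi blo bhi : Nat) :
    bp_longest a b alo ahi blo bhi =
      ((List.range' alo (ahi - alo)).foldl
        (fun st i => (List.range (bhi - blo)).foldl (istep a b blo i st.1)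
          (List.replicate (bhi - blo) 0, st.2))
        (List.replicate (bhi - blo) 0, (alo, blo, 0))).2 := rfl

-- one inner step (cell idx = c of row tmax+1) preserves the row and best invariants
lemma inner_step (a b : List String) (alo blo n tmax c : Nat) (row : List Nat)
    (st2 : List Nat × Nat × Nat × Nat) (hc : c < n)
    (hrow : RowP a b alo blo n tmax row)
    (hnew : NewP a b alo blo n tmax c st2.1)
    (hbest : BestP a b alo blo n tmax c st2.2) :
    NewP a b alo blo n tmax (c + 1) (istep a b blo (alo + tmax) row st2 c).1 ∧
      BestP a b alo blo n tmax (c + 1) (istep a b blo (alo + tmax) row st2 c).2 := by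
  obtain ⟨hrl, hrv⟩ := hrow
  obtain ⟨hnl, hnv⟩ := hnew
  unfold istep
  by_cases hm : a.getD (alo + tmax) "" = b.getD (blo + c) ""
  · rw [if_pos hm]
    simp only []
    set k := (if c = 0 then 0 else row.getD (c - 1) 0) + 1 with hk
    have hdp : dpR a b alo blo (tmax + 1) (blo + c) = k := by
      simp only [dpR, if_pos hm, hk]
      by_cases hc0 : c = 0
      · subst hc0; simp
      · have hb : blo < blo + c := by omega
        rw [if_pos hb, if_neg hc0]
        have : blo + c - 1 = blo + (c - 1) := by omega
        rw [this, hrv (c - 1) (by omega)]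
    constructor
    · refine ⟨by simpa using hnl, ?_⟩
      intro idx hidx
      rcases eq_or_ne idx c with rfl | hne
      · rw [List.getD_eq_getElem?_getD, List.getElem?_set_self (by omega),
          Option.getD_some, if_pos (by omega)]
        exact hdp.symm
      · rw [List.getD_eq_getElem?_getD, List.getElem?_set_ne (by omega),
          ← List.getD_eq_getElem?_getD, hnv idx hidx]
        by_cases h1 : idx < c
        · rw [if_pos h1, if_pos (by omega)]
        · rw [if_neg h1, if_neg (by omega)]
    · -- best invariant
      have hcell : cellIn tmax n (c + 1) (tmax + 1) c := Or.inr ⟨rfl, by omega⟩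
      have hmono : ∀ t idx, cellIn tmax n c t idx → cellIn tmax n (c + 1) t idx := by
        unfold cellIn; omega
      have hsplit : ∀ t idx, cellIn tmax n (c + 1) t idx →
          cellIn tmax n c t idx ∨ (t = tmax + 1 ∧ idx = c) := by
        unfold cellIn; omega
      by_cases hlt : st2.2.2.2 < k
      · rw [if_pos hlt]
        refine Or.inr ⟨show 1 ≤ k by omega,
          ⟨tmax + 1, c, hcell, hdp, show alo + tmax + 1 - k = alo + (tmax + 1) - k by omega,
            show blo + c + 1 - k = blo + c + 1 - k from rfl⟩, ?_⟩
        intro t idx hcin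
        show dpR a b alo blo t (blo + idx) ≤ k
        rcases hsplit t idx hcin with h | ⟨rfl, rfl⟩
        · rcases hbest with ⟨_, h2⟩ | ⟨_, _, h3⟩
          · rw [h2 t idx h]; omega
          · have := h3 t idx h; omega
        · rw [hdp]
      · rw [if_neg hlt]
        rcases hbest with ⟨h1, h2⟩ | ⟨h1, h2, h3⟩
        · -- previously all zero, and k ≥ 1 would beat 0: impossible since ¬(best.k < k)
          exfalso
          have : st2.2.2.2 = 0 := by rw [h1]
          omega
        · refine Or.inr ⟨h1, ?_, ?_⟩
          · obtain ⟨t, idx, hcin, h⟩ := h2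
            exact ⟨t, idx, hmono t idx hcin, h⟩
          · intro t idx hcin
            rcases hsplit t idx hcin with h | ⟨rfl, rfl⟩
            · exact h3 t idx h
            · rw [hdp]; omega
  · rw [if_neg hm]
    have hdp0 : dpR a b alo blo (tmax + 1) (blo + c) = 0 := by
      simp only [dpR, if_neg hm]
    constructor
    · refine ⟨hnl, ?_⟩
      intro idx hidx
      rw [hnv idx hidx]
      by_cases h1 : idx < c
      · rw [if_pos h1, if_pos (by omega)]
      · rw [if_neg h1]
        by_cases h2 : idx < c + 1
        · have : idx = c := by omega
          subst this
          rw [if_pos h2, hdp0]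
        · rw [if_neg h2]
    · have hsplit : ∀ t idx, cellIn tmax n (c + 1) t idx →
          cellIn tmax n c t idx ∨ (t = tmax + 1 ∧ idx = c) := by
        unfold cellIn; omega
      rcases hbest with ⟨h1, h2⟩ | ⟨h1, h2, h3⟩
      · refine Or.inl ⟨h1, ?_⟩
        intro t idx hcin
        rcases hsplit t idx hcin with h | ⟨rfl, rfl⟩
        · exact h2 t idx h
        · exact hdp0
      · refine Or.inr ⟨h1, ?_, ?_⟩
        · obtain ⟨t, idx, hcin, h⟩ := h2
          exact ⟨t, idx, (by unfold cellIn at hcin ⊢; omega), h⟩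
        · intro t idx hcin
          rcases hsplit t idx hcin with h | ⟨rfl, rfl⟩
          · exact h3 t idx h
          · rw [hdp0]; omega

-- folding the inner loop over range c keeps the invariants
lemma inner_fold (a b : List String) (alo blo n tmax : Nat) (row : List Nat)
    (best0 : Nat × Nat × Nat)
    (hrow : RowP a b alo blo n tmax row)
    (hbest : BestP a b alo blo n tmax 0 best0) :
    ∀ c, c ≤ n →
      NewP a b alo blo n tmax c
          ((List.range c).foldl (istep a b blo (alo + tmax) row) (List.replicate n 0, best0)).1 ∧
        BestP a b alo blo n tmax c
          ((List.range c).foldl (istep a b blo (alo + tmax) row) (List.replicate n 0, best0)).2 := by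
  intro c
  induction c with
  | zero =>
    intro _
    refine ⟨⟨by simp, ?_⟩, by simpa using hbest⟩
    intro idx hidx
    simp [List.getD_eq_getElem?_getD, hidx]
  | succ c ih =>
    intro hc
    have := ih (by omega)
    rw [List.range_succ, List.foldl_append, List.foldl_cons, List.foldl_nil]
    exact inner_step a b alo blo n tmax c row _ (by omega) hrow this.1 this.2

-- the outer loop: after the rows alo … alo+T-1 the state satisfies the invariants at T
lemma outer_fold (a b : List String) (alo blo n : Nat) :
    ∀ T,
      RowP a b alo blo n T
          ((List.range' alo T).foldl
            (fun st i => (List.range n).foldl (istep a b blo i st.1) (List.replicate n 0, st.2))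
            (List.replicate n 0, (alo, blo, 0))).1 ∧
        BestP a b alo blo n T 0
          ((List.range' alo T).foldl
            (fun st i => (List.range n).foldl (istep a b blo i st.1) (List.replicate n 0, st.2))
            (List.replicate n 0, (alo, blo, 0))).2 := by
  intro T
  induction T with
  | zero =>
    constructor
    · refine ⟨by simp, ?_⟩
      intro idx hidx
      simp [List.getD_eq_getElem?_getD, hidx, dpR]
    · exact Or.inl ⟨rfl, by unfold cellIn; omega⟩
  | succ T ih =>
    rw [List.range'_concat, List.foldl_append, List.foldl_cons, List.foldl_nil]
    simp only [one_mul]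
    set st := (List.range' alo T).foldl
      (fun st i => (List.range n).foldl (istep a b blo i st.1) (List.replicate n 0, st.2))
      (List.replicate n 0, (alo, blo, 0)) with hst
    have h := inner_fold a b alo blo n T st.1 st.2 ih.1 ih.2 n (le_refl n)
    constructor
    · obtain ⟨h1, h2⟩ := h.1
      refine ⟨h1, ?_⟩
      intro idx hidx
      rw [h2 idx hidx, if_pos hidx]
    · exact BestP_shift a b alo blo n T _ h.2

-- the characterisation of bp_longest: its best-so-far invariant at the full window
lemma bp_longest_spec (a b : List String) (alo ahi blo bhi : Nat) :
    BestP a b alo blo (bhi - blo) (ahi - alo) 0 (bp_longest a b alo ahi blo bhi) := by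
  rw [bp_longest_eq_istep]
  exact (outer_fold a b alo blo (bhi - blo) (ahi - alo)).2

-- a degenerate window finds nothing
lemma bp_longest_degenerate (a b : List String) (alo ahi blo bhi : Nat)
    (h : ahi ≤ alo ∨ bhi ≤ blo) : bp_longest a b alo ahi blo bhi = (alo, blo, 0) := by
  rcases (bp_longest_spec a b alo ahi blo bhi) with ⟨h1, _⟩ | ⟨h1, ⟨t, idx, hcin, _⟩, _⟩
  · exact h1
  · exfalso
    unfold cellIn at hcin
    rcases h with h | h
    · have h2 := dpR_le_left a b alo blo t (blo + idx)
      omega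
    · omega

-- the block bp_longest returns lies inside the window
lemma bp_longest_bounds (a b : List String) (alo ahi blo bhi : Nat) :
    (bp_longest a b alo ahi blo bhi).2.2 ≠ 0 →
      alo ≤ (bp_longest a b alo ahi blo bhi).1 ∧
      (bp_longest a b alo ahi blo bhi).1 + (bp_longest a b alo ahi blo bhi).2.2 ≤ ahi ∧
      blo ≤ (bp_longest a b alo ahi blo bhi).2.1 ∧
      (bp_longest a b alo ahi blo bhi).2.1 + (bp_longest a b alo ahi blo bhi).2.2 ≤ bhi := by
  intro hk
  rcases (bp_longest_spec a b alo ahi blo bhi) with ⟨h1, _⟩ | ⟨h1, ⟨t, idx, hcin, hdp, hi, hj⟩, _⟩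
  · rw [h1] at hk; simp at hk
  · unfold cellIn at hcin
    have hl := dpR_le_left a b alo blo t (blo + idx)
    have hr := dpR_le_right a b alo blo t (blo + idx)
    rw [hi, hj]
    omega

-- difflib's backward-extension loop never fires on the DP optimum (no junk)
lemma ext1_noop (a b : List String) (alo ahi blo bhi : Nat) :
    ∀ fuel, dl_ext1 a b alo blo fuel (bp_longest a b alo ahi blo bhi) =
      bp_longest a b alo ahi blo bhi := by
  have hspec := bp_longest_spec a b alo ahi blo bhi
  rcases hbp : bp_longest a b alo ahi blo bhi with ⟨bi, bj, K⟩
  rw [hbp] at hspec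
  simp only [BestP] at hspec
  have hcond : ¬ (alo < bi ∧ blo < bj ∧ a.getD (bi - 1) "" = b.getD (bj - 1) "") := by
    rintro ⟨h1, h2, h3⟩
    rcases hspec with ⟨heq, _⟩ | ⟨hK, ⟨t, idx, hcin, hdp, hi, hj⟩, _⟩
    · rw [Prod.mk.injEq, Prod.mk.injEq] at heq
      omega
    · have hl := dpR_le_left a b alo blo t (blo + idx)
      have hr := dpR_le_right a b alo blo t (blo + idx)
      have hge : K + 1 ≤ dpR a b alo blo t (blo + idx) := by
        refine dpR_ge a b alo blo (K + 1) t (blo + idx) (by omega) ?_ ?_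
        · intro s hs
          by_cases hsK : s < K
          · exact (dpR_run a b alo blo t (blo + idx) s (by omega)).1
          · have e1 : alo + t - 1 - s = bi - 1 := by omega
            have e2 : blo + idx - s = bj - 1 := by omega
            rw [e1, e2]; exact h3
        · intro s hs
          by_cases hsK : s < K - 1
          · exact (dpR_run a b alo blo t (blo + idx) s (by omega)).2 (by omega)
          · omega
      omega
  intro fuel
  cases fuel with
  | zero => rfl
  | succ fuel => simp only [dl_ext1, if_neg hcond]

-- …and the forward-extension loop neither: the DP optimum is already maximal
lemma ext2_noop (a b : List String) (alo ahi blo bhi : Nat) :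
    ∀ fuel, dl_ext2 a b ahi bhi fuel (bp_longest a b alo ahi blo bhi) =
      bp_longest a b alo ahi blo bhi := by
  have hspec := bp_longest_spec a b alo ahi blo bhi
  rcases hbp : bp_longest a b alo ahi blo bhi with ⟨bi, bj, K⟩
  rw [hbp] at hspec
  simp only [BestP] at hspec
  have hcond : ¬ (bi + K < ahi ∧ bj + K < bhi ∧ a.getD (bi + K) "" = b.getD (bj + K) "") := by
    rintro ⟨h1, h2, h3⟩
    rcases hspec with ⟨heq, hzero⟩ | ⟨hK, ⟨t, idx, hcin, hdp, hi, hj⟩, hmax⟩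
    · rw [Prod.mk.injEq, Prod.mk.injEq] at heq
      obtain ⟨e1, e2, e3⟩ := heq
      have hcell : cellIn (ahi - alo) (bhi - blo) 0 1 0 := Or.inl ⟨le_refl 1, by omega, by omega⟩
      have hz := hzero 1 0 hcell
      simp only [dpR, Nat.add_zero] at hz
      have h3' : a.getD alo "" = b.getD blo "" := by
        have ei : bi + K = alo := by omega
        have ej : bj + K = blo := by omega
        rw [← ei, ← ej]; exact h3
      rw [if_pos h3'] at hz
      omega
    · have hl := dpR_le_left a b alo blo t (blo + idx)
      have hr := dpR_le_right a b alo blo t (blo + idx)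
      unfold cellIn at hcin
      have hcell : cellIn (ahi - alo) (bhi - blo) 0 (t + 1) (idx + 1) :=
        Or.inl ⟨by omega, by omega, by omega⟩
      have hstep : dpR a b alo blo (t + 1) (blo + (idx + 1)) = K + 1 := by
        simp only [dpR]
        have e1 : alo + t = bi + K := by omega
        have e2 : blo + (idx + 1) = bj + K := by omega
        rw [e1, e2, if_pos h3, if_pos (by omega)]
        have e3 : bj + K - 1 = blo + idx := by omega
        rw [e3, hdp]
      have := hmax (t + 1) (idx + 1) hcell
      omega
  intro fuel
  cases fuel with
  | zero => rfl
  | succ fuel => simp only [dl_ext2, if_neg hcond]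

-- b2j: the per-line occurrence index lists exactly the matching b-indices, ascending
lemma b2j_fold (ps : List (String × Nat)) :
    ∀ (d : PySem.Dict String (List Nat)) (s : String),
      (ps.foldl (fun d p => d.modify p.1 [] (fun l => l ++ [p.2])) d).getD s [] =
        d.getD s [] ++ (ps.filter (fun p => p.1 == s)).map Prod.snd := by
  induction ps with
  | nil => intro d s; simp
  | cons p ps ih =>
    intro d s
    rw [List.foldl_cons, ih, List.filter_cons]
    by_cases h : p.1 = s
    · rw [if_pos (by simpa using h), PySem.Dict.getD_modify, if_pos h.symm, h]
      simp
    · rw [if_neg (by simpa using h), PySem.Dict.getD_modify, if_neg (fun hh => h hh.symm)]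

lemma zipIdx_occ (b : List String) :
    ∀ (n : Nat) (s : String),
      ((b.zipIdx n).filter (fun p => p.1 == s)).map Prod.snd =
        (List.range' n b.length).filter (fun j => b.getD (j - n) "" == s) := by
  induction b with
  | nil => intro n s; simp
  | cons x b ih =>
    intro n s
    rw [List.zipIdx_cons, List.filter_cons, List.length_cons, List.range'_succ, List.filter_cons]
    have htail : (List.range' (n + 1) b.length).filter (fun j => (x :: b).getD (j - n) "" == s) =
        (List.range' (n + 1) b.length).filter (fun j => b.getD (j - (n + 1)) "" == s) := by
      apply List.filter_congr
      intro j hj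
      have hge : n + 1 ≤ j := (List.mem_range'_1.1 hj).1
      have : j - n = (j - (n + 1)) + 1 := by omega
      rw [this]
      rfl
    have hhead : ((x, n).1 == s) = ((x :: b).getD (n - n) "" == s) := by
      simp
    by_cases h : x = s
    · rw [if_pos (by simpa using h), if_pos (by rw [← hhead]; simpa using h)]
      rw [List.map_cons, ih (n + 1) s, htail]
    · rw [if_neg (by simpa using h), if_neg (by rw [← hhead]; simpa using h)]
      rw [ih (n + 1) s, htail]

lemma b2j_getD (b : List String) (s : String) :
    (dl_b2j b).getD s [] = (List.range b.length).filter (fun j => b.getD j "" == s) := by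
  unfold dl_b2j
  rw [b2j_fold, PySem.Dict.getD_empty, List.nil_append, zipIdx_occ]
  rw [List.range_eq_range']
  apply List.filter_congr
  intro j _
  simp

-- proof-side names for the two inner-loop bodies with the cell test stripped
def dstep (j2len : PySem.Dict Int Nat) (i : Nat)
    (st : PySem.Dict Int Nat × Nat × Nat × Nat) (j : Nat) :
    PySem.Dict Int Nat × Nat × Nat × Nat :=
  let k := j2len.getD ((j : Int) - 1) 0 + 1
  (st.1.insert (j : Int) k, if st.2.2.2 < k then (i + 1 - k, j + 1 - k, k) else st.2)

def lstep (row : List Nat) (blo i : Nat)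
    (st2 : List Nat × Nat × Nat × Nat) (idx : Nat) : List Nat × Nat × Nat × Nat :=
  let k := (if idx = 0 then 0 else row.getD (idx - 1) 0) + 1
  (st2.1.set idx k, if st2.2.2.2 < k then (i + 1 - k, blo + idx + 1 - k, k) else st2.2)

-- dl_inner skips the indices below blo …
lemma dl_inner_skip (j2len : PySem.Dict Int Nat) (blo bhi i : Nat) :
    ∀ (L1 rest : List Nat) (newd : PySem.Dict Int Nat) (best : Nat × Nat × Nat),
      (∀ x ∈ L1, x < blo) →
      dl_inner j2len blo bhi i (L1 ++ rest) newd best =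
        dl_inner j2len blo bhi i rest newd best := by
  intro L1
  induction L1 with
  | nil => intro rest newd best _; rfl
  | cons x L1 ih =>
    intro rest newd best h
    rw [List.cons_append]
    show dl_inner j2len blo bhi i (x :: (L1 ++ rest)) newd best = _
    rw [dl_inner, if_pos (h x List.mem_cons_self)]
    exact ih rest newd best (fun y hy => h y (List.mem_cons_of_mem x hy))

-- … processes the window cells, and breaks at the first index ≥ bhi
lemma dl_inner_main (j2len : PySem.Dict Int Nat) (blo bhi i : Nat) (hb : blo ≤ bhi) :
    ∀ (L2 L3 : List Nat) (newd : PySem.Dict Int Nat) (best : Nat × Nat × Nat),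
      (∀ x ∈ L2, blo ≤ x ∧ x < bhi) → (∀ x ∈ L3, bhi ≤ x) →
      dl_inner j2len blo bhi i (L2 ++ L3) newd best =
        L2.foldl (dstep j2len i) (newd, best) := by
  intro L2
  induction L2 with
  | nil =>
    intro L3 newd best _ h3
    cases L3 with
    | nil => rfl
    | cons x L3 =>
      rw [List.nil_append, dl_inner, if_neg (by have := h3 x List.mem_cons_self; omega),
        if_pos (h3 x List.mem_cons_self)]
      rfl
  | cons x L2 ih =>
    intro L3 newd best h2 h3
    have hx := h2 x List.mem_cons_self
    rw [List.cons_append, dl_inner, if_neg (by omega), if_neg (by omega)]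
    rw [ih L3 _ _ (fun y hy => h2 y (List.mem_cons_of_mem x hy)) h3]
    rfl

-- the dict j2len and B's row array hold the same values
def RelD (blo n : Nat) (d : PySem.Dict Int Nat) (row : List Nat) : Prop :=
  row.length = n ∧ ∀ z : Int,
    d.getD z 0 = if 0 ≤ z ∧ (blo : Int) ≤ z ∧ z < (blo : Int) + n then row.getD (z.toNat - blo) 0 else 0

lemma RelD_k (blo n : Nat) (j2len : PySem.Dict Int Nat) (row : List Nat)
    (hR : RelD blo n j2len row) (idx : Nat) (hidx : idx < n) :
    j2len.getD (((blo + idx : Nat) : Int) - 1) 0 = (if idx = 0 then 0 else row.getD (idx - 1) 0) := by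
  obtain ⟨hl, hv⟩ := hR
  rw [hv]
  by_cases h0 : idx = 0
  · have hcond : ¬(0 ≤ ((blo + idx : Nat) : Int) - 1 ∧ (blo : Int) ≤ ((blo + idx : Nat) : Int) - 1 ∧
        ((blo + idx : Nat) : Int) - 1 < (blo : Int) + n) := by
      push_cast; omega
    rw [if_neg hcond, if_pos h0]
  · have hcond : 0 ≤ ((blo + idx : Nat) : Int) - 1 ∧ (blo : Int) ≤ ((blo + idx : Nat) : Int) - 1 ∧
        ((blo + idx : Nat) : Int) - 1 < (blo : Int) + n := by
      push_cast; omega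
    rw [if_pos hcond, if_neg h0]
    congr 1
    omega

-- one matching cell: the two strip-down steps stay related and agree on the best
lemma step_bisim (blo n i : Nat) (j2len : PySem.Dict Int Nat) (row : List Nat)
    (hR : RelD blo n j2len row) (idx : Nat) (hidx : idx < n)
    (d2 : PySem.Dict Int Nat) (new : List Nat) (best : Nat × Nat × Nat)
    (h2 : RelD blo n d2 new) :
    RelD blo n (dstep j2len i (d2, best) (blo + idx)).1 (lstep row blo i (new, best) idx).1 ∧
      (dstep j2len i (d2, best) (blo + idx)).2 = (lstep row blo i (new, best) idx).2 := by
  obtain ⟨hl2, hv2⟩ := h2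
  have hk := RelD_k blo n j2len row hR idx hidx
  simp only [dstep, lstep, hk]
  constructor
  · refine ⟨by simpa using hl2, ?_⟩
    intro z
    rw [PySem.Dict.getD_insert]
    by_cases hz : z = ((blo + idx : Nat) : Int)
    · subst hz
      have e1 : (((blo + idx : Nat) : Int)).toNat - blo = idx := by omega
      have hcond : 0 ≤ ((blo + idx : Nat) : Int) ∧ (blo : Int) ≤ ((blo + idx : Nat) : Int) ∧
          ((blo + idx : Nat) : Int) < (blo : Int) + n := by push_cast; omega
      rw [if_pos rfl, if_pos hcond, e1]
      conv_rhs => rw [List.getD_eq_getElem?_getD]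
      rw [List.getElem?_set_self (by omega), Option.getD_some]
    · rw [if_neg hz, hv2]
      by_cases hin : 0 ≤ z ∧ (blo : Int) ≤ z ∧ z < (blo : Int) + n
      · have hne : idx ≠ z.toNat - blo := by omega
        rw [if_pos hin, if_pos hin]
        conv_rhs => rw [List.getD_eq_getElem?_getD]
        rw [List.getElem?_set_ne hne, ← List.getD_eq_getElem?_getD]
      · rw [if_neg hin, if_neg hin]
  · trivial

-- folding over the common cell list preserves the relation
lemma fold_bisim (blo n i : Nat) (j2len : PySem.Dict Int Nat) (row : List Nat)
    (hR : RelD blo n j2len row) :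
    ∀ (C : List Nat), (∀ idx ∈ C, idx < n) →
      ∀ (d2 : PySem.Dict Int Nat) (new : List Nat) (best : Nat × Nat × Nat),
        RelD blo n d2 new →
        RelD blo n
            (C.foldl (fun st2 idx => dstep j2len i st2 (blo + idx)) (d2, best)).1
            (C.foldl (lstep row blo i) (new, best)).1 ∧
          (C.foldl (fun st2 idx => dstep j2len i st2 (blo + idx)) (d2, best)).2 =
            (C.foldl (lstep row blo i) (new, best)).2 := by
  intro C
  induction C with
  | nil => intro _ d2 new best h2; exact ⟨h2, rfl⟩
  | cons idx C ih =>
    intro hC d2 new best h2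
    have hidx := hC idx List.mem_cons_self
    rw [List.foldl_cons, List.foldl_cons]
    rcases hd : dstep j2len i (d2, best) (blo + idx) with ⟨dd, db⟩
    rcases hlp : lstep row blo i (new, best) idx with ⟨ld, lb⟩
    have hstep := step_bisim blo n i j2len row hR idx hidx d2 new best h2
    rw [hd, hlp] at hstep
    obtain ⟨hrel, hbe⟩ := hstep
    dsimp only at hrel hbe
    cases hbe
    exact ih (fun y hy => hC y (List.mem_cons_of_mem idx hy)) dd ld db hrel

lemma foldl_guard {α : Type} (p : Nat → Prop) [DecidablePred p] (f : α → Nat → α) :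
    ∀ (l : List Nat) (init : α),
      l.foldl (fun acc x => if p x then f acc x else acc) init =
        (l.filter (fun x => decide (p x))).foldl f init := by
  intro l
  induction l with
  | nil => intro init; rfl
  | cons x l ih =>
    intro init
    rw [List.foldl_cons, List.filter_cons]
    by_cases h : p x
    · rw [if_pos h, if_pos (by simpa using h), List.foldl_cons, ih]
    · rw [if_neg h, if_neg (by simpa using h), ih]

lemma RelD_init (blo n : Nat) : RelD blo n PySem.Dict.empty (List.replicate n 0) := by
  refine ⟨by simp, ?_⟩
  intro z
  rw [PySem.Dict.getD_empty]
  split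
  · rw [List.getD_eq_getElem?_getD, List.getElem?_replicate]
    split <;> simp
  · rfl

-- one full row: difflib's occurrence-list pass equals B's row scan, preserving the relation
lemma row_eq (a b : List String) (blo bhi : Nat) (h1 : blo ≤ bhi) (h2 : bhi ≤ b.length) (i : Nat)
    (j2len : PySem.Dict Int Nat) (row : List Nat)
    (hR : RelD blo (bhi - blo) j2len row) (best : Nat × Nat × Nat) :
    RelD blo (bhi - blo)
        (dl_inner j2len blo bhi i ((dl_b2j b).getD (a.getD i "") []) PySem.Dict.empty best).1
        ((List.range (bhi - blo)).foldl (istep a b blo i row)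
          (List.replicate (bhi - blo) 0, best)).1 ∧
      (dl_inner j2len blo bhi i ((dl_b2j b).getD (a.getD i "") []) PySem.Dict.empty best).2 =
        ((List.range (bhi - blo)).foldl (istep a b blo i row)
          (List.replicate (bhi - blo) 0, best)).2 := by
  have hocc := b2j_getD b (a.getD i "")
  have hsplit : List.range b.length =
      List.range' 0 blo ++ (List.range' blo (bhi - blo) ++ List.range' bhi (b.length - bhi)) := by
    have e1 : List.range' blo (bhi - blo) ++ List.range' bhi (b.length - bhi) =
        List.range' blo (b.length - blo) := by
      have := @List.range'_append blo (bhi - blo) (b.length - bhi) 1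
      simp only [one_mul] at this
      rw [show blo + (bhi - blo) = bhi by omega] at this
      rw [this]
      congr 1
      omega
    have e2 : List.range' 0 blo ++ List.range' blo (b.length - blo) = List.range' 0 b.length := by
      have := @List.range'_append 0 blo (b.length - blo) 1
      simp only [one_mul, Nat.zero_add] at this
      rw [this]
      congr 1
      omega
    rw [e1, e2, List.range_eq_range']
  set p : Nat → Bool := fun j => b.getD j "" == a.getD i "" with hp
  have hoccsplit : (dl_b2j b).getD (a.getD i "") [] =
      (List.range' 0 blo).filter p ++
        ((List.range' blo (bhi - blo)).filter p ++ (List.range' bhi (b.length - bhi)).filter p) := by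
    rw [hocc, hsplit, List.filter_append, List.filter_append]
  -- dl side: skip, process, break
  have hdl : dl_inner j2len blo bhi i ((dl_b2j b).getD (a.getD i "") []) PySem.Dict.empty best =
      ((List.range' blo (bhi - blo)).filter p).foldl (dstep j2len i) (PySem.Dict.empty, best) := by
    rw [hoccsplit, dl_inner_skip _ _ _ _ _ _ _ _
      (by intro x hx; have := List.mem_range'_1.1 (List.mem_of_mem_filter hx); omega)]
    exact dl_inner_main j2len blo bhi i h1 _ _ _ _
      (by intro x hx; have := List.mem_range'_1.1 (List.mem_of_mem_filter hx); omega)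
      (by intro x hx; have := List.mem_range'_1.1 (List.mem_of_mem_filter hx); omega)
  -- B side: strip the guard
  have hbp : (List.range (bhi - blo)).foldl (istep a b blo i row)
        (List.replicate (bhi - blo) 0, best) =
      ((List.range (bhi - blo)).filter
          (fun idx => decide (a.getD i "" = b.getD (blo + idx) ""))).foldl
        (lstep row blo i) (List.replicate (bhi - blo) 0, best) := by
    rw [← foldl_guard (fun idx => a.getD i "" = b.getD (blo + idx) "") (lstep row blo i)]
    rfl
  -- shift the dl cell list to idx form
  have hshift : (List.range' blo (bhi - blo)).filter p =
      ((List.range (bhi - blo)).filter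
          (fun idx => decide (a.getD i "" = b.getD (blo + idx) ""))).map (fun idx => blo + idx) := by
    rw [List.range'_eq_map_range, List.filter_map]
    congr 1
    apply List.filter_congr
    intro x _
    simp only [Function.comp, hp]
    by_cases h : a.getD i "" = b.getD (blo + x) ""
    · rw [h]
      simp
    · have h' : (b.getD (blo + x) "" == a.getD i "") = false := by
        simpa using fun hh => h hh.symm
      rw [h']
      simpa using h
  have hfold : ((List.range' blo (bhi - blo)).filter p).foldl (dstep j2len i)
        (PySem.Dict.empty, best) =
      ((List.range (bhi - blo)).filter
          (fun idx => decide (a.getD i "" = b.getD (blo + idx) ""))).foldl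
        (fun st2 idx => dstep j2len i st2 (blo + idx)) (PySem.Dict.empty, best) := by
    rw [hshift, List.foldl_map]
  have hC : ∀ idx ∈ (List.range (bhi - blo)).filter
      (fun idx => decide (a.getD i "" = b.getD (blo + idx) "")), idx < bhi - blo := by
    intro idx hidx
    exact List.mem_range.1 (List.mem_of_mem_filter hidx)
  have := fold_bisim blo (bhi - blo) i j2len row hR _ hC PySem.Dict.empty
    (List.replicate (bhi - blo) 0) best (RelD_init blo (bhi - blo))
  rw [hdl, hfold, hbp]
  exact this

-- the outer loops stay in lockstep
lemma outer_bisim (a b : List String) (blo bhi : Nat) (h1 : blo ≤ bhi) (h2 : bhi ≤ b.length) :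
    ∀ (I : List Nat) (j2len : PySem.Dict Int Nat) (row : List Nat) (best : Nat × Nat × Nat),
      RelD blo (bhi - blo) j2len row →
      RelD blo (bhi - blo)
          (I.foldl (fun st i => dl_inner st.1 blo bhi i ((dl_b2j b).getD (a.getD i "") [])
            PySem.Dict.empty st.2) (j2len, best)).1
          (I.foldl (fun st i => (List.range (bhi - blo)).foldl (istep a b blo i st.1)
            (List.replicate (bhi - blo) 0, st.2)) (row, best)).1 ∧
        (I.foldl (fun st i => dl_inner st.1 blo bhi i ((dl_b2j b).getD (a.getD i "") [])
          PySem.Dict.empty st.2) (j2len, best)).2 =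
          (I.foldl (fun st i => (List.range (bhi - blo)).foldl (istep a b blo i st.1)
            (List.replicate (bhi - blo) 0, st.2)) (row, best)).2 := by
  intro I
  induction I with
  | nil => intro j2len row best hR; exact ⟨hR, rfl⟩
  | cons i I ih =>
    intro j2len row best hR
    rw [List.foldl_cons, List.foldl_cons]
    have hrow := row_eq a b blo bhi h1 h2 i j2len row hR best
    rcases hd : dl_inner j2len blo bhi i ((dl_b2j b).getD (a.getD i "") [])
      PySem.Dict.empty best with ⟨dd, db⟩
    rcases hl : (List.range (bhi - blo)).foldl (istep a b blo i row)
      (List.replicate (bhi - blo) 0, best) with ⟨ld, lb⟩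
    rw [hd, hl] at hrow
    obtain ⟨hrel, hbe⟩ := hrow
    dsimp only at hrel hbe
    cases hbe
    exact ih dd ld db hrel

-- the difflib core loop computes exactly B's DP optimum
lemma core_eq (a b : List String) (alo ahi blo bhi : Nat)
    (h1 : blo ≤ bhi) (h2 : bhi ≤ b.length) :
    dl_flm_core a (dl_b2j b) alo ahi blo bhi = bp_longest a b alo ahi blo bhi := by
  rw [bp_longest_eq_istep]
  unfold dl_flm_core
  exact (outer_bisim a b blo bhi h1 h2 (List.range' alo (ahi - alo))
    PySem.Dict.empty (List.replicate (bhi - blo) 0) (alo, blo, 0)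
    (RelD_init blo (bhi - blo))).2

-- find_longest_match as a whole: core + two vacuous extension loops
lemma flm_eq (a b : List String) (alo ahi blo bhi : Nat)
    (h1 : blo ≤ bhi) (h2 : bhi ≤ b.length) :
    dl_flm a b (dl_b2j b) alo ahi blo bhi = bp_longest a b alo ahi blo bhi := by
  unfold dl_flm
  rw [core_eq a b alo ahi blo bhi h1 h2]
  show dl_ext2 a b ahi bhi ahi (dl_ext1 a b alo blo (bp_longest a b alo ahi blo bhi).1
    (bp_longest a b alo ahi blo bhi)) = bp_longest a b alo ahi blo bhi
  rw [ext1_noop, ext2_noop]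

-- the loop's emission order: root block, then the right sub-window, then the left
def emitL (a b : List String) : Nat → Nat → Nat → Nat → Nat → List (Nat × Nat × Nat)
  | 0, _, _, _, _ => []
  | fuel + 1, alo, ahi, blo, bhi =>
    match bp_longest a b alo ahi blo bhi with
    | (i, j, k) =>
      if k ≠ 0 then
        (i, j, k) :: (emitL a b fuel (i + k) ahi (j + k) bhi ++ emitL a b fuel alo i blo j)
      else []

lemma emitL_nil (a b : List String) (f alo ahi blo bhi : Nat)
    (h : (bp_longest a b alo ahi blo bhi).2.2 = 0) : emitL a b f alo ahi blo bhi = [] := by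
  cases f with
  | zero => rfl
  | succ f =>
    rw [emitL]
    rcases hbp : bp_longest a b alo ahi blo bhi with ⟨i, j, k⟩
    rw [hbp] at h
    dsimp only
    simp only at h
    subst h
    simp

-- enough fuel: the result no longer depends on it
lemma emitL_stable (a b : List String) :
    ∀ (f : Nat) (g alo ahi blo bhi : Nat),
      (ahi - alo) + (bhi - blo) + 1 ≤ f → (ahi - alo) + (bhi - blo) + 1 ≤ g →
      emitL a b f alo ahi blo bhi = emitL a b g alo ahi blo bhi := by
  intro f
  induction f with
  | zero => intro g alo ahi blo bhi hf _; omega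
  | succ f ih =>
    intro g alo ahi blo bhi hf hg
    obtain ⟨g, rfl⟩ : ∃ g', g = g' + 1 := ⟨g - 1, by omega⟩
    rw [emitL, emitL]
    rcases hbp : bp_longest a b alo ahi blo bhi with ⟨i, j, k⟩
    dsimp only
    by_cases hk : k ≠ 0
    · rw [if_pos hk, if_pos hk]
      have hb := bp_longest_bounds a b alo ahi blo bhi (by rw [hbp]; exact hk)
      rw [hbp] at hb
      simp only at hb
      rw [ih g (i + k) ahi (j + k) bhi (by omega) (by omega),
        ih g alo i blo j (by omega) (by omega)]
    · rw [if_neg hk, if_neg hk]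

-- window cost: an upper bound on the pops the queue loop spends on it
def wcost (w : Nat × Nat × Nat × Nat) : Nat := (w.2.1 - w.1) + (w.2.2.2 - w.2.2.1) + 1

def emitW (a b : List String) (w : Nat × Nat × Nat × Nat) : List (Nat × Nat × Nat) :=
  emitL a b (wcost w) w.1 w.2.1 w.2.2.1 w.2.2.2

lemma emitW_unfold (a b : List String) (alo ahi blo bhi i j k : Nat)
    (hbp : bp_longest a b alo ahi blo bhi = (i, j, k)) (hk : k ≠ 0) :
    emitW a b (alo, ahi, blo, bhi) =
      (i, j, k) :: (emitW a b (i + k, ahi, j + k, bhi) ++ emitW a b (alo, i, blo, j)) := by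
  have hb := bp_longest_bounds a b alo ahi blo bhi (by rw [hbp]; exact hk)
  rw [hbp] at hb
  dsimp only at hb
  show emitL a b ((ahi - alo) + (bhi - blo) + 1) alo ahi blo bhi =
    (i, j, k) :: (emitL a b ((ahi - (i + k)) + (bhi - (j + k)) + 1) (i + k) ahi (j + k) bhi ++
      emitL a b ((i - alo) + (j - blo) + 1) alo i blo j)
  conv_lhs => rw [emitL]
  rw [hbp]
  dsimp only
  rw [if_pos hk,
    emitL_stable a b ((ahi - alo) + (bhi - blo)) ((ahi - (i + k)) + (bhi - (j + k)) + 1)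
      (i + k) ahi (j + k) bhi (by omega) (by omega),
    emitL_stable a b ((ahi - alo) + (bhi - blo)) ((i - alo) + (j - blo) + 1)
      alo i blo j (by omega) (by omega)]

-- the queue loop drains the stack into the emission orders of its windows
lemma mb_drain (a b : List String) :
    ∀ (fuel : Nat) (stack : List (Nat × Nat × Nat × Nat)) (acc : List (Nat × Nat × Nat)),
      (∀ w ∈ stack, w.2.2.1 ≤ w.2.2.2 ∧ w.2.2.2 ≤ b.length) →
      (stack.map wcost).sum ≤ fuel →
      dl_mb_loop a b (dl_b2j b) fuel stack acc = acc ++ stack.flatMap (emitW a b) := by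
  intro fuel
  induction fuel with
  | zero =>
    intro stack acc hwf hsum
    cases stack with
    | nil => simp [dl_mb_loop]
    | cons w rest => exfalso; simp only [List.map_cons, List.sum_cons, wcost] at hsum; omega
  | succ fuel ih =>
    intro stack acc hwf hsum
    cases stack with
    | nil => simp [dl_mb_loop]
    | cons w rest =>
      rcases w with ⟨alo, ahi, blo, bhi⟩
      have hwfw := hwf _ List.mem_cons_self
      have hsum' : (rest.map wcost).sum + ((ahi - alo) + (bhi - blo) + 1) ≤ fuel + 1 := by
        simp only [List.map_cons, List.sum_cons, wcost] at hsum
        omega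
      rw [dl_mb_loop]
      rw [flm_eq a b alo ahi blo bhi hwfw.1 hwfw.2]
      rcases hbp : bp_longest a b alo ahi blo bhi with ⟨i, j, k⟩
      dsimp only
      by_cases hk : k ≠ 0
      · rw [if_pos hk]
        have hb := bp_longest_bounds a b alo ahi blo bhi (by rw [hbp]; exact hk)
        rw [hbp] at hb
        dsimp only at hb
        have hEw := emitW_unfold a b alo ahi blo bhi i j k hbp hk
        obtain ⟨hb1, hb2, hb3, hb4⟩ := hb
        have hk1 : 1 ≤ k := Nat.one_le_iff_ne_zero.2 hk
        have hwfw1 : blo ≤ bhi := hwfw.1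
        have hwfw2 : bhi ≤ b.length := hwfw.2
        have hwfr : (i + k, ahi, j + k, bhi).2.2.1 ≤ (i + k, ahi, j + k, bhi).2.2.2 ∧
            (i + k, ahi, j + k, bhi).2.2.2 ≤ b.length :=
          ⟨show j + k ≤ bhi by omega, show bhi ≤ b.length by omega⟩
        have hwfl : (alo, i, blo, j).2.2.1 ≤ (alo, i, blo, j).2.2.2 ∧
            (alo, i, blo, j).2.2.2 ≤ b.length :=
          ⟨show blo ≤ j by omega, show j ≤ b.length by omega⟩
        have hcr : wcost (i + k, ahi, j + k, bhi) = (ahi - (i + k)) + (bhi - (j + k)) + 1 := rfl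
        have hcl : wcost (alo, i, blo, j) = (i - alo) + (j - blo) + 1 := rfl
        by_cases hgl : alo < i ∧ blo < j <;> by_cases hgr : i + k < ahi ∧ j + k < bhi
        · rw [if_pos hgl, if_pos hgr]
          have hS : ((((i + k, ahi, j + k, bhi) : Nat × Nat × Nat × Nat) ::
              ((alo, i, blo, j) : Nat × Nat × Nat × Nat) :: rest).map wcost).sum ≤ fuel := by
            simp only [List.map_cons, List.sum_cons, hcr, hcl]
            omega
          rw [ih ((i + k, ahi, j + k, bhi) :: (alo, i, blo, j) :: rest) (acc ++ [(i, j, k)]) (by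
              intro w hw
              simp only [List.mem_cons] at hw
              rcases hw with rfl | rfl | h
              · exact hwfr
              · exact hwfl
              · exact hwf w (List.mem_cons_of_mem _ h)) hS]
          simp only [List.flatMap_cons, hEw]
          simp
        · rw [if_pos hgl, if_neg hgr]
          have hnr : emitW a b (i + k, ahi, j + k, bhi) = [] := by
            apply emitL_nil
            rw [bp_longest_degenerate a b (i + k) ahi (j + k) bhi (by omega)]
          have hS : ((((alo, i, blo, j) : Nat × Nat × Nat × Nat) :: rest).map wcost).sum ≤ fuel := by
            simp only [List.map_cons, List.sum_cons, hcl]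
            omega
          rw [ih ((alo, i, blo, j) :: rest) (acc ++ [(i, j, k)]) (by
              intro w hw
              simp only [List.mem_cons] at hw
              rcases hw with rfl | h
              · exact hwfl
              · exact hwf w (List.mem_cons_of_mem _ h)) hS]
          simp only [List.flatMap_cons, hEw, hnr]
          simp
        · rw [if_neg hgl, if_pos hgr]
          have hnl : emitW a b (alo, i, blo, j) = [] := by
            apply emitL_nil
            rw [bp_longest_degenerate a b alo i blo j (by omega)]
          have hS : ((((i + k, ahi, j + k, bhi) : Nat × Nat × Nat × Nat) :: rest).map wcost).sum ≤ fuel := by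
            simp only [List.map_cons, List.sum_cons, hcr]
            omega
          rw [ih ((i + k, ahi, j + k, bhi) :: rest) (acc ++ [(i, j, k)]) (by
              intro w hw
              simp only [List.mem_cons] at hw
              rcases hw with rfl | h
              · exact hwfr
              · exact hwf w (List.mem_cons_of_mem _ h)) hS]
          simp only [List.flatMap_cons, hEw, hnl]
          simp
        · rw [if_neg hgl, if_neg hgr]
          have hnr : emitW a b (i + k, ahi, j + k, bhi) = [] := by
            apply emitL_nil
            rw [bp_longest_degenerate a b (i + k) ahi (j + k) bhi (by omega)]
          have hnl : emitW a b (alo, i, blo, j) = [] := by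
            apply emitL_nil
            rw [bp_longest_degenerate a b alo i blo j (by omega)]
          rw [ih rest (acc ++ [(i, j, k)])
            (fun w hw => hwf w (List.mem_cons_of_mem _ hw)) (by omega)]
          simp only [List.flatMap_cons, hEw, hnr, hnl]
          simp
      · rw [if_neg hk]
        have hnw : emitW a b (alo, ahi, blo, bhi) = [] := by
          apply emitL_nil
          rw [hbp]
          simpa using hk
        rw [ih rest acc (fun w hw => hwf w (List.mem_cons_of_mem _ hw)) (by omega)]
        rw [List.flatMap_cons, hnw]
        simp

-- emission order is a permutation of the in-order recursion
lemma emit_perm (a b : List String) :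
    ∀ (f alo ahi blo bhi : Nat),
      (emitL a b f alo ahi blo bhi).Perm (bp_blocks a b f alo ahi blo bhi) := by
  intro f
  induction f with
  | zero => intro alo ahi blo bhi; rfl
  | succ f ih =>
    intro alo ahi blo bhi
    rw [emitL, bp_blocks]
    rcases hbp : bp_longest a b alo ahi blo bhi with ⟨i, j, k⟩
    dsimp only
    by_cases hk : k ≠ 0
    · rw [if_pos hk, if_pos hk]
      have h1 : ((i, j, k) :: (emitL a b f (i + k) ahi (j + k) bhi ++ emitL a b f alo i blo j)) =
          ((i, j, k) :: emitL a b f (i + k) ahi (j + k) bhi) ++ emitL a b f alo i blo j := rfl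
      rw [h1]
      refine (List.perm_append_comm).trans ?_
      exact (ih alo i blo j).append ((ih (i + k) ahi (j + k) bhi).cons _)
    · rw [if_neg hk, if_neg hk]

-- every block of the recursion lies inside its window, with k ≥ 1
lemma bp_blocks_bounds (a b : List String) :
    ∀ (f alo ahi blo bhi : Nat), ∀ blk ∈ bp_blocks a b f alo ahi blo bhi,
      alo ≤ blk.1 ∧ blk.1 + blk.2.2 ≤ ahi ∧ 1 ≤ blk.2.2 ∧
        blo ≤ blk.2.1 ∧ blk.2.1 + blk.2.2 ≤ bhi := by
  intro f
  induction f with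
  | zero => intro alo ahi blo bhi blk h; simp [bp_blocks] at h
  | succ f ih =>
    intro alo ahi blo bhi blk h
    rw [bp_blocks] at h
    rcases hbp : bp_longest a b alo ahi blo bhi with ⟨i, j, k⟩
    rw [hbp] at h
    dsimp only at h
    by_cases hk : k ≠ 0
    · rw [if_pos hk] at h
      have hb := bp_longest_bounds a b alo ahi blo bhi (by rw [hbp]; exact hk)
      rw [hbp] at hb
      dsimp only at hb
      rw [List.mem_append, List.mem_cons] at h
      rcases h with h | h | h
      · have := ih alo i blo j blk h
        omega
      · subst h
        dsimp only
        omega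
      · have := ih (i + k) ahi (j + k) bhi blk h
        omega
    · rw [if_neg hk] at h
      simp at h

lemma bp_blocks_pairwise (a b : List String) :
    ∀ (f alo ahi blo bhi : Nat),
      (bp_blocks a b f alo ahi blo bhi).Pairwise (fun x y => x.1 < y.1) := by
  intro f
  induction f with
  | zero => intro alo ahi blo bhi; simp [bp_blocks]
  | succ f ih =>
    intro alo ahi blo bhi
    rw [bp_blocks]
    rcases hbp : bp_longest a b alo ahi blo bhi with ⟨i, j, k⟩
    dsimp only
    by_cases hk : k ≠ 0
    · rw [if_pos hk]
      have hb := bp_longest_bounds a b alo ahi blo bhi (by rw [hbp]; exact hk)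
      rw [hbp] at hb
      dsimp only at hb
      rw [List.pairwise_append]
      refine ⟨ih alo i blo j, ?_, ?_⟩
      · rw [List.pairwise_cons]
        refine ⟨?_, ih (i + k) ahi (j + k) bhi⟩
        intro y hy
        have := bp_blocks_bounds a b f (i + k) ahi (j + k) bhi y hy
        dsimp only
        omega
      · intro x hx y hy
        have hxb := bp_blocks_bounds a b f alo i blo j x hx
        rw [List.mem_cons] at hy
        rcases hy with rfl | hy
        · dsimp only; omega
        · have hyb := bp_blocks_bounds a b f (i + k) ahi (j + k) bhi y hy
          omega
    · rw [if_neg hk]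
      simp

-- Python's tuple sort of the emitted blocks is exactly the in-order recursion
lemma sorted_emit (a b : List String) (f alo ahi blo bhi : Nat) :
    PySem.List.sorted (emitL a b f alo ahi blo bhi) (fun t => t.1) false =
      bp_blocks a b f alo ahi blo bhi :=
  PySem.List.sorted_eq_of_perm_of_pairwise_lt _ _ (fun t => t.1)
    (emit_perm a b f alo ahi blo bhi).symm (bp_blocks_pairwise a b f alo ahi blo bhi)

-- what A's fold appends for one opcode
def gA (ol nl : List String) (op : String × Nat × Nat × Nat × Nat) : List String :=
  if op.1 = "equal" then []
  else [srBlock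
    (PySem.Str.join "\n" (PySem.List.slice ol (some (op.2.1 : Int)) (some (op.2.2.1 : Int))))
    (PySem.Str.join "\n" (PySem.List.slice nl (some (op.2.2.2.1 : Int)) (some (op.2.2.2.2 : Int))))]

lemma a_blocks_step_eq (ol nl : List String) :
    a_blocks_step ol nl = fun acc op => acc ++ gA ol nl op := by
  funext acc op
  obtain ⟨tag, i1, i2, j1, j2⟩ := op
  simp only [a_blocks_step, gA]
  split <;> simp

lemma a_opcodes_acc (mbs : List (Nat × Nat × Nat)) :
    ∀ (i j : Nat) (ans : List (String × Nat × Nat × Nat × Nat)),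
      a_opcodes mbs i j ans = ans ++ a_opcodes mbs i j [] := by
  induction mbs with
  | nil => intro i j ans; simp [a_opcodes]
  | cons h t ih =>
    obtain ⟨ai, bj, size⟩ := h
    intro i j ans
    simp only [a_opcodes]
    conv_lhs => rw [ih]
    conv_rhs => rw [ih]
    split_ifs <;> simp

lemma b_gaps_acc (ol nl : List String) (mbs : List (Nat × Nat × Nat)) :
    ∀ (i j : Nat) (parts : List String),
      b_gaps ol nl mbs i j parts = parts ++ b_gaps ol nl mbs i j [] := by
  induction mbs with
  | nil => intro i j parts; simp [b_gaps]
  | cons h t ih =>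
    obtain ⟨ai, bj, size⟩ := h
    intro i j parts
    simp only [b_gaps]
    conv_lhs => rw [ih]
    conv_rhs => rw [ih]
    split_ifs <;> simp

-- A's opcode walk renders exactly the gaps between the blocks
lemma flat_eq (ol nl : List String) (mbs : List (Nat × Nat × Nat)) : ∀ (i j : Nat),
    (a_opcodes mbs i j []).flatMap (gA ol nl) = b_gaps ol nl mbs i j [] := by
  induction mbs with
  | nil => intro i j; simp [a_opcodes, b_gaps]
  | cons hd t ih =>
    obtain ⟨ai, bj, size⟩ := hd
    intro i j
    simp only [a_opcodes, b_gaps]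
    rw [a_opcodes_acc, b_gaps_acc]
    by_cases h1 : i < ai <;> by_cases h2 : j < bj <;>
      split_ifs <;> simp_all [gA] <;> omega

lemma dl_merge_acc :
    ∀ (L : List (Nat × Nat × Nat)) (p : Nat × Nat × Nat) (acc : List (Nat × Nat × Nat)),
      dl_merge L p acc = acc ++ dl_merge L p [] := by
  intro L
  induction L with
  | nil =>
    intro p acc
    rcases p with ⟨i1, j1, k1⟩
    simp only [dl_merge]
    split_ifs <;> simp
  | cons q t ih =>
    intro p acc
    rcases p with ⟨i1, j1, k1⟩
    rcases q with ⟨i2, j2, k2⟩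
    simp only [dl_merge]
    split_ifs
    · exact ih _ acc
    · rw [ih _ (acc ++ [(i1, j1, k1)]), ih _ ([] ++ [(i1, j1, k1)])]
      simp
    · exact ih _ acc

-- a zero-length block at the cursor renders nothing and moves nothing
lemma b_gaps_zero (ol nl : List String) (X : List (Nat × Nat × Nat)) (i j : Nat)
    (parts : List String) :
    b_gaps ol nl ((i, j, 0) :: X) i j parts = b_gaps ol nl X i j parts := by
  simp only [b_gaps, if_neg (show ¬(i < i ∨ j < j) by omega), Nat.add_zero]

-- two adjacent blocks render like their merge
lemma b_gaps_adj (ol nl : List String) (X : List (Nat × Nat × Nat))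
    (i j i1 j1 k1 k2 : Nat) (parts : List String) :
    b_gaps ol nl ((i1, j1, k1) :: (i1 + k1, j1 + k1, k2) :: X) i j parts =
      b_gaps ol nl ((i1, j1, k1 + k2) :: X) i j parts := by
  simp only [b_gaps, if_neg (show ¬(i1 + k1 < i1 + k1 ∨ j1 + k1 < j1 + k1) by omega)]
  rw [show i1 + k1 + k2 = i1 + (k1 + k2) from by omega,
    show j1 + k1 + k2 = j1 + (k1 + k2) from by omega]

-- merging adjacent blocks does not change the rendered gaps
lemma merge_gaps (ol nl : List String) :
    ∀ (L T : List (Nat × Nat × Nat)) (i1 j1 k1 i j : Nat),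
      (∀ blk ∈ L, 1 ≤ blk.2.2) → (k1 ≠ 0 ∨ (i1 = i ∧ j1 = j)) →
      b_gaps ol nl (dl_merge L (i1, j1, k1) [] ++ T) i j [] =
        b_gaps ol nl ((i1, j1, k1) :: (L ++ T)) i j [] := by
  intro L
  induction L with
  | nil =>
    intro T i1 j1 k1 i j _ hp
    simp only [dl_merge]
    by_cases hk : k1 ≠ 0
    · rw [if_pos hk]
      simp
    · rw [if_neg hk]
      have hk0 : k1 = 0 := by omega
      subst hk0
      rcases hp with h | ⟨rfl, rfl⟩
      · omega
      · rw [b_gaps_zero]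
  | cons q t ih =>
    intro T i1 j1 k1 i j hL hp
    rcases q with ⟨i2, j2, k2⟩
    have hk2 : 1 ≤ (i2, j2, k2).2.2 := hL _ List.mem_cons_self
    dsimp only at hk2
    have hLt : ∀ blk ∈ t, 1 ≤ blk.2.2 := fun blk hb => hL blk (List.mem_cons_of_mem _ hb)
    simp only [dl_merge]
    by_cases hadj : i1 + k1 = i2 ∧ j1 + k1 = j2
    · rw [if_pos hadj]
      rw [ih T i1 j1 (k1 + k2) i j hLt (Or.inl (by omega))]
      obtain ⟨h1, h2⟩ := hadj
      rw [← h1, ← h2]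
      exact (b_gaps_adj ol nl (t ++ T) i j i1 j1 k1 k2 []).symm
    · rw [if_neg hadj]
      by_cases hk : k1 ≠ 0
      · rw [if_pos hk]
        rw [dl_merge_acc t (i2, j2, k2) ([] ++ [(i1, j1, k1)])]
        show b_gaps ol nl (((i1, j1, k1) :: dl_merge t (i2, j2, k2) []) ++ T) i j [] = _
        rw [List.cons_append]
        simp only [b_gaps]
        conv_lhs => rw [b_gaps_acc]
        conv_rhs => rw [b_gaps_acc]
        congr 1
        exact ih T i2 j2 k2 (i1 + k1) (j1 + k1) hLt (Or.inl (by omega))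
      · rw [if_neg hk]
        have hk0 : k1 = 0 := by omega
        subst hk0
        rcases hp with h | ⟨rfl, rfl⟩
        · omega
        · exact (ih T i2 j2 k2 i1 j1 hLt (Or.inl (by omega))).trans
            (b_gaps_zero ol nl ((i2, j2, k2) :: t ++ T) i1 j1 []).symm

-- difflib's matching_blocks pipeline collapses to the in-order recursion plus the merge pass
lemma matching_eq (a b : List String) :
    dl_matching_blocks a b =
      dl_merge (bp_blocks a b (a.length + b.length + 1) 0 a.length 0 b.length) (0, 0, 0) [] ++
        [(a.length, b.length, 0)] := by
  show dl_merge (PySem.List.sorted (dl_mb_loop a b (dl_b2j b) (a.length + b.length + 1)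
      [(0, a.length, 0, b.length)] []) (fun t => t.1)) (0, 0, 0) [] ++
      [(a.length, b.length, 0)] = _
  rw [mb_drain a b (a.length + b.length + 1) [(0, a.length, 0, b.length)] []
    (by
      intro w hw
      simp only [List.mem_cons, List.not_mem_nil, or_false] at hw
      subst hw
      exact ⟨Nat.zero_le _, le_refl _⟩)
    (by simp [wcost])]
  have hroot : emitW a b (0, a.length, 0, b.length) =
      emitL a b (a.length + b.length + 1) 0 a.length 0 b.length := by
    unfold emitW wcost
    simp
  rw [List.nil_append, List.flatMap_cons, List.flatMap_nil, List.append_nil, hroot, sorted_emit]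

theorem pv_main (old new : String) :
    build_search_replace_py old new = build_search_replace_py_alt old new := by
  unfold build_search_replace_py build_search_replace_py_alt
  simp only [a_blocks_step_eq, PySem.List.foldl_append_eq_flatMap, flat_eq, List.nil_append]
  rw [matching_eq]
  rw [merge_gaps (PySem.Str.splitlines old) (PySem.Str.splitlines new)
    (bp_blocks (PySem.Str.splitlines old) (PySem.Str.splitlines new)
      ((PySem.Str.splitlines old).length + (PySem.Str.splitlines new).length + 1)
      0 (PySem.Str.splitlines old).length 0 (PySem.Str.splitlines new).length)
    [((PySem.Str.splitlines old).length, (PySem.Str.splitlines new).length, 0)] 0 0 0 0 0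
    (fun blk hb => (bp_blocks_bounds _ _ _ _ _ _ _ blk hb).2.2.1)
    (Or.inr ⟨rfl, rfl⟩)]
  rw [b_gaps_zero]

-- ===== VERDICT (by name: the statement is the Claim_ definition above) =====
theorem build_search_replace_py_spec : Claim_equal_build_search_replace_py := by
  intro old new _
  exact pv_main old new
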